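-- pv_equiv track=rewrite | github.com/jhillierdavis/advent-of-code-solutions | aoc-2023/aoc-2023-day-12/solution-in-python3/solution.py | get_damaged_contiguous_spring_list_from_condition_record
-- ===== SOURCE A (Python) =====
-- def get_damaged_contiguous_spring_list_from_condition_record(input):
--     values = []
--     springs = input + '.' # Add extra char to ease matching
--
--     count_broken = 0
--     for i in range(len(springs)):
--         char = springs[i]
--         if char == '#':
--             count_broken += 1
--         elif count_broken > 0 :
--             values.append(count_broken)
--             count_broken = 0
--     return values
-- ===== SOURCE B (Python) =====
-- def get_damaged_contiguous_spring_list_from_condition_record(input):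
--     # Normalize every non-'#' character to '.', split on '.', keep the
--     # non-empty chunks (the maximal '#'-runs) and return their lengths.
--     normalized = ''.join(c if c == '#' else '.' for c in input)
--     return [len(chunk) for chunk in normalized.split('.') if chunk]
-- ===== Notes on version B (the rewrite author's own statement) =====
-- stated objective: idiomatic
-- what changed: Replaces A's single-pass counter state machine with appended sentinel by a normalize / split-on-separator / filter-map pipeline over whole chunks.
import Mathlib
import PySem

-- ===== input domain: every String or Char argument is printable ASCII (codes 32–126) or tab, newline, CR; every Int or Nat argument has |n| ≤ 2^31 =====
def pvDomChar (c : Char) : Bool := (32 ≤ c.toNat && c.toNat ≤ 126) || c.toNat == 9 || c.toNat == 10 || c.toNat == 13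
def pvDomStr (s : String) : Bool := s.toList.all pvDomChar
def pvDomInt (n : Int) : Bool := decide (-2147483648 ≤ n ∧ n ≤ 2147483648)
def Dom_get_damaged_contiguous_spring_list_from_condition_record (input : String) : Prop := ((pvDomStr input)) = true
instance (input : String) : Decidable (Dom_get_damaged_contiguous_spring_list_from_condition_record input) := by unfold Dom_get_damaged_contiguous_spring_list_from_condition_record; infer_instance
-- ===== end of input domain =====

-- B replaces A's counter state machine (with appended '.' sentinel) by a
-- normalize / split-on-'.' / filter-map pipeline; same cost, more idiomatic.

-- ===== PORT A =====
def get_damaged_contiguous_spring_list_from_condition_record (input : String) : List Int :=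
  let springs := input ++ "."  -- Add extra char to ease matching
  let cs := springs.toList
  ((PySem.List.pyRange 0 (cs.length : Int) 1).foldl
    (fun (st : List Int × Int) i =>
      let char := PySem.List.pyGetD cs i ' '   -- index always in range
      if char = '#' then (st.1, st.2 + 1)
      else if st.2 > 0 then (st.1 ++ [st.2], (0 : Int)) else st)
    ([], 0)).1

-- ===== PORT B =====
def get_damaged_contiguous_spring_list_from_condition_record_alt (input : String) : List Int :=
  let normalized := input.toList.map (fun c => if c = '#' then c else '.')
  ((normalized.splitOn '.').filter (fun chunk => chunk ≠ [])).map
    (fun chunk => (chunk.length : Int))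

-- ===== PRECONDITION & SPEC =====
def Spec_get_damaged_contiguous_spring_list_from_condition_record (input : String) (out : List Int) : Prop := out = get_damaged_contiguous_spring_list_from_condition_record_alt input
instance (input : String) (out : List Int) : Decidable (Spec_get_damaged_contiguous_spring_list_from_condition_record input out) := by unfold Spec_get_damaged_contiguous_spring_list_from_condition_record; infer_instance

-- ===== CLAIM (what is proved, stated in full; the proofs are below) =====
def Claim_equal_get_damaged_contiguous_spring_list_from_condition_record : Prop := ∀ (input : String), Dom_get_damaged_contiguous_spring_list_from_condition_record input → Spec_get_damaged_contiguous_spring_list_from_condition_record input (get_damaged_contiguous_spring_list_from_condition_record input)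

-- ===== LEMMAS AND PROOFS =====

-- A's loop body as a step function on (values, count_broken)
def pvStep (st : List Int × Int) (c : Char) : List Int × Int :=
  if c = '#' then (st.1, st.2 + 1)
  else if st.2 > 0 then (st.1 ++ [st.2], (0 : Int)) else st

-- The run-length list of cs assuming a pending run of k '#'s before cs.
def pvR (k : Nat) : List Char → List Int
  | [] => if 0 < k then [(k : Int)] else []
  | c :: cs => if c = '#' then pvR (k + 1) cs else
               if 0 < k then (k : Int) :: pvR 0 cs else pvR 0 cs

theorem pvA_fold (cs : List Char) : ∀ (vs : List Int) (k : Nat),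
    ((cs ++ ['.']).foldl pvStep (vs, (k : Int))).1 = vs ++ pvR k cs := by
  induction cs with
  | nil =>
    intro vs k
    rcases Nat.eq_zero_or_pos k with hk | hk
    · subst hk; simp [pvStep, pvR]
    · simp [pvStep, pvR, hk]
  | cons c cs ih =>
    intro vs k
    by_cases hc : c = '#'
    · subst hc
      have hcast : ((k : Int) + 1) = ((k + 1 : Nat) : Int) := by push_cast; ring
      simp only [List.cons_append, List.foldl_cons]
      have hstep : pvStep (vs, (k : Int)) '#' = (vs, ((k + 1 : Nat) : Int)) := by
        unfold pvStep
        rw [if_pos rfl, hcast]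
      rw [hstep, ih vs (k + 1)]
      simp [pvR]
    · rcases Nat.eq_zero_or_pos k with hk | hk
      · subst hk
        simp only [List.cons_append, List.foldl_cons, pvStep, if_neg hc]
        simpa [pvR, hc] using ih vs 0
      · have h : (0 : Int) < (k : Int) := by exact_mod_cast hk
        simp only [List.cons_append, List.foldl_cons, pvStep, if_neg hc, if_pos h]
        have hrest := ih (vs ++ [(k : Int)]) 0
        simp only [Nat.cast_zero] at hrest
        rw [hrest]
        simp [pvR, hc, hk]

theorem pvB_split (cs : List Char) : ∀ (k : Nat),
    ((((cs.map (fun c => if c = '#' then c else '.')).splitOnP (fun c => c == '.')).modifyHead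
        (fun h => List.replicate k '#' ++ h)).filter (fun chunk => chunk ≠ [])).map
      (fun chunk => (chunk.length : Int)) = pvR k cs := by
  induction cs with
  | nil =>
    intro k
    rcases Nat.eq_zero_or_pos k with hk | hk
    · subst hk; simp [List.splitOnP_nil, pvR]
    · have hne : List.replicate k '#' ≠ [] := by
        simp [List.replicate_eq_nil_iff]; omega
      simp [List.splitOnP_nil, pvR, hk, hne]
  | cons c cs ih =>
    intro k
    by_cases hc : c = '#'
    · subst hc
      have hsplit : ((('#' :: cs).map (fun c => if c = '#' then c else '.')).splitOnP
          (fun c => c == '.')) =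
          List.modifyHead (List.cons '#') ((cs.map (fun c => if c = '#' then c else '.')).splitOnP
            (fun c => c == '.')) := by
        simp [List.splitOnP_cons]
      rw [hsplit, List.modifyHead_modifyHead]
      have hfun : ((fun h => List.replicate k '#' ++ h) ∘ List.cons '#') =
          (fun h => List.replicate (k + 1) '#' ++ h) := by
        funext h
        simp [List.replicate_succ', List.append_assoc]
      rw [hfun, ih (k + 1)]
      simp [pvR]
    · have hsplit : (((c :: cs).map (fun c => if c = '#' then c else '.')).splitOnP
          (fun c => c == '.')) =
          [] :: ((cs.map (fun c => if c = '#' then c else '.')).splitOnP (fun c => c == '.')) := by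
        simp [List.splitOnP_cons, hc]
      rw [hsplit]
      have hid : (fun h : List Char => List.replicate 0 '#' ++ h) = id :=
        funext (fun h => rfl)
      have tail := ih 0
      rw [hid, List.modifyHead_id, id_eq] at tail
      rcases Nat.eq_zero_or_pos k with hk | hk
      · subst hk
        simp only [List.modifyHead_cons, List.replicate_zero, List.nil_append]
        simp [pvR, hc]
        simpa using tail
      · have hne : List.replicate k '#' ≠ [] := by
          simp [List.replicate_eq_nil_iff]; omega
        simp only [List.modifyHead_cons, List.append_nil]
        simp [pvR, hc, hk, hne]
        simpa using tail

-- ===== VERDICT (by name: the statement is the Claim_ definition above) =====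
theorem get_damaged_contiguous_spring_list_from_condition_record_spec : Claim_equal_get_damaged_contiguous_spring_list_from_condition_record := by
  intro input _
  unfold Spec_get_damaged_contiguous_spring_list_from_condition_record
  unfold get_damaged_contiguous_spring_list_from_condition_record
  unfold get_damaged_contiguous_spring_list_from_condition_record_alt
  simp only []
  rw [show (fun (st : List Int × Int) (i : Int) =>
        if PySem.List.pyGetD (input ++ ".").toList i ' ' = '#' then (st.1, st.2 + 1)
        else if st.2 > 0 then (st.1 ++ [st.2], (0 : Int)) else st)
      = (fun st i => pvStep st (PySem.List.pyGetD (input ++ ".").toList i ' ')) from rfl]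
  rw [PySem.List.foldl_pyRange_zero_pyGetD' ((input ++ ".").toList) ' '
      pvStep (([], 0) : List Int × Int)]
  have h1 : (input ++ ".").toList = input.toList ++ ['.'] := by simp
  rw [h1]
  have h2 := pvA_fold input.toList [] 0
  simp only [Nat.cast_zero, List.nil_append] at h2
  rw [h2]
  have hid : (fun h : List Char => List.replicate 0 '#' ++ h) = id :=
    funext (fun h => rfl)
  have h3 := pvB_split input.toList 0
  rw [hid, List.modifyHead_id, id_eq] at h3
  rw [← h3]
  rfl
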